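-- pv_equiv track=rewrite | github.com/shane10j/LRS-Error-Correction | src/omega_longread/preprocessing.py | detect_tandem_repeat_flags
-- ===== SOURCE A (Python) =====
-- from typing import Dict, Iterable, Iterator, List, Mapping, Sequence
--
-- def detect_tandem_repeat_flags(seq: str, max_motif_len: int = 3, min_repeats: int = 2) -> List[int]:
--     flags = [0] * len(seq)
--     for motif_len in range(1, max_motif_len + 1):
--         span = motif_len * min_repeats
--         for start in range(0, max(len(seq) - span + 1, 0)):
--             motif = seq[start : start + motif_len]
--             if "N" in motif or len(motif) < motif_len:
--                 continue
--             matched = True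
--             offset = start
--             repeat_count = 0
--             while offset + motif_len <= len(seq) and seq[offset : offset + motif_len] == motif:
--                 repeat_count += 1
--                 offset += motif_len
--             if matched and repeat_count >= min_repeats:
--                 for idx in range(start, min(offset, len(seq))):
--                     flags[idx] = 1
--     return flags
-- ===== SOURCE B (Python) =====
-- def detect_tandem_repeat_flags(seq: str, max_motif_len: int = 3, min_repeats: int = 2) -> list:
--     n = len(seq)
--     # nextN[j]: smallest index >= j holding 'N', or n if none
--     nextN = [n] * (n + 1)
--     for j in range(n - 1, -1, -1):
--         nextN[j] = j if seq[j] == 'N' else nextN[j + 1]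
--     diff = [0] * (n + 1)
--     # a motif of length m can only reach min_repeats repeats if m * max(min_repeats, 1) <= n
--     for m in range(1, min(max_motif_len, n // max(min_repeats, 1)) + 1):
--         # run[j]: length of the maximal block of positions j' >= j with seq[j'] == seq[j' + m]
--         run = [0] * (n + 1)
--         for j in range(n - 1, -1, -1):
--             if j + m < n and seq[j] == seq[j + m]:
--                 run[j] = run[j + 1] + 1
--         for s in range(0, n - m + 1):
--             if nextN[s] < s + m:
--                 continue  # motif would contain 'N'
--             rep = 1 + run[s] // m
--             if rep >= min_repeats:
--                 diff[s] += 1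
--                 diff[s + rep * m] -= 1
--     flags = []
--     cov = 0
--     for i in range(n):
--         cov += diff[i]
--         flags.append(1 if cov > 0 else 0)
--     return flags
-- ===== Notes on version B (the rewrite author's own statement) =====
-- stated objective: faster
-- what changed: Instead of re-scanning the repeat run from every start with repeated slice comparisons, B precomputes per motif length m the run lengths of positions where the character m places later matches (one backward pass), reads each start's repeat count as 1+run//m, records covered intervals in a difference array emitted by one final prefix-sum pass, uses a lookahead array for the excluded unknown-base character instead of a per-motif scan, and skips motif lengths m with m*max(min_repeats,1)>len(seq), which can never reach min_repeats repeats.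
import Mathlib
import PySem

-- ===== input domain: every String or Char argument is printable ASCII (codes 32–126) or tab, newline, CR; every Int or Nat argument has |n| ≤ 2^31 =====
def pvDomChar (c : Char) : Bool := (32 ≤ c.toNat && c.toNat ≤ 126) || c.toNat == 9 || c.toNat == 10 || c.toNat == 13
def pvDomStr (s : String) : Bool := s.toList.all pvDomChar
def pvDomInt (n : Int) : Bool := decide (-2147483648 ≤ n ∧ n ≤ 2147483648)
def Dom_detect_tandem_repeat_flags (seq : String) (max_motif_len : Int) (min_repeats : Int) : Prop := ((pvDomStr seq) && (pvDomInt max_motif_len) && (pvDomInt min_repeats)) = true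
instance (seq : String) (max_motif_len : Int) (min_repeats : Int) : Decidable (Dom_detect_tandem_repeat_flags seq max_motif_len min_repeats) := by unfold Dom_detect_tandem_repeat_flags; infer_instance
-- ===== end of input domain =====

-- B replaces A's per-start slice re-scans by per-motif-length run-length precomputation plus a
-- difference-array coverage pass (objective: faster; asymptotically fewer character comparisons).


-- ===== PORT A =====
-- A's inner while loop, with fuel (cs.length + 1 always suffices: motif_len ≥ 1, so the loop
-- advances offset by ≥ 1 each iteration and runs at most cs.length times)
def pvWhileA (cs motif : List Char) (m : Int) : Int → Int → Nat → Int × Int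
  | offset, rc, 0 => (offset, rc)
  | offset, rc, Nat.succ fuel =>
    if offset + m ≤ (cs.length : Int) ∧ PySem.List.slice cs (some offset) (some (offset + m)) = motif
    then pvWhileA cs motif m (offset + m) (rc + 1) fuel
    else (offset, rc)

def detect_tandem_repeat_flags (seq : String) (max_motif_len : Int) (min_repeats : Int) : List Int :=
  let cs := seq.toList
  let n : Int := cs.length
  let flags0 : List Int := List.replicate cs.length 0
  (PySem.List.pyRange 1 (max_motif_len + 1) 1).foldl (fun flags motif_len =>
    let span := motif_len * min_repeats
    (PySem.List.pyRange 0 (max (n - span + 1) 0) 1).foldl (fun flags start =>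
      let motif := PySem.List.slice cs (some start) (some (start + motif_len))
      if PySem.Chars.isIn ['N'] motif ∨ (motif.length : Int) < motif_len then flags
      else
        let matched := true
        let res := pvWhileA cs motif motif_len start 0 (cs.length + 1)
        if matched = true ∧ min_repeats ≤ res.2 then
          (PySem.List.pyRange start (min res.1 n) 1).foldl
            (fun fl idx => PySem.List.pySetD fl idx 1) flags
        else flags) flags) flags0

-- ===== PORT B =====
-- Source B's nextN array: nextN[j] = smallest index ≥ j holding 'N', or len(seq)
def pvNextN (cs : List Char) (j : Nat) : Nat :=
  if h : j < cs.length then (if cs.getD j ' ' = 'N' then j else pvNextN cs (j+1)) else cs.length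
termination_by cs.length - j

-- Source B's run array: run[j] = length of the maximal block of j' ≥ j with seq[j'] == seq[j'+m]
def pvRun (cs : List Char) (m : Nat) (j : Nat) : Nat :=
  if h : j + m < cs.length ∧ cs.getD j ' ' = cs.getD (j+m) ' ' then pvRun cs m (j+1) + 1 else 0
termination_by cs.length - j
decreasing_by omega

def pvBump (d : List Int) (i : Nat) (v : Int) : List Int := d.set i (d.getD i 0 + v)

def detect_tandem_repeat_flags_alt (seq : String) (max_motif_len : Int) (min_repeats : Int) : List Int :=
  let cs := seq.toList
  let n := cs.length
  let diff : List Int :=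
    -- a motif of length m can only reach min_repeats repeats if m * max(min_repeats, 1) <= n
    (PySem.List.pyRange 1
        (min max_motif_len (PySem.Int.floordiv (n : Int) (max min_repeats 1)) + 1) 1).foldl
      (fun diff mi =>
      let m := mi.toNat
      (List.range (n - m + 1)).foldl (fun diff s =>
        if pvNextN cs s < s + m then diff
        else
          let rep := 1 + pvRun cs m s / m
          if min_repeats ≤ (rep : Int) then pvBump (pvBump diff s 1) (s + rep * m) (-1) else diff)
        diff) (List.replicate (n+1) 0)
  ((List.range n).foldl (fun (acc : List Int × Int) i =>
    let cov := acc.2 + diff.getD i 0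
    (acc.1 ++ [if 0 < cov then (1:Int) else 0], cov)) ([], 0)).1

-- ===== PRECONDITION & SPEC =====
def Spec_detect_tandem_repeat_flags (seq : String) (max_motif_len : Int) (min_repeats : Int) (out : List Int) : Prop := out = detect_tandem_repeat_flags_alt seq max_motif_len min_repeats
instance (seq : String) (max_motif_len : Int) (min_repeats : Int) (out : List Int) : Decidable (Spec_detect_tandem_repeat_flags seq max_motif_len min_repeats out) := by unfold Spec_detect_tandem_repeat_flags; infer_instance

-- ===== CLAIM (what is proved, stated in full; the proofs are below) =====
def Claim_equal_detect_tandem_repeat_flags : Prop := ∀ (seq : String) (max_motif_len : Int) (min_repeats : Int), Dom_detect_tandem_repeat_flags seq max_motif_len min_repeats → Spec_detect_tandem_repeat_flags seq max_motif_len min_repeats (detect_tandem_repeat_flags seq max_motif_len min_repeats)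

-- ===== LEMMAS AND PROOFS =====

-- ---- shared proof-side vocabulary ----
-- number of repeats of the motif of length m at start s, and the end of the repeated region
def pvCnt (cs : List Char) (m s : Nat) : Nat := 1 + pvRun cs m s / m
def pvEnd (cs : List Char) (m s : Nat) : Nat := s + pvCnt cs m s * m
-- "(m, s) produces a flagged interval": window in range, motif N-free, enough repeats
abbrev pvQualP (cs : List Char) (mr : Int) (m s : Nat) : Prop :=
  s + m ≤ cs.length ∧ (∀ k < m, cs.getD (s + k) ' ' ≠ 'N') ∧ mr ≤ (pvCnt cs m s : Int)
-- "position i is flagged"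
abbrev pvCovP (cs : List Char) (mr M : Int) (i : Nat) : Prop :=
  ∃ k < cs.length, (((k+1 : Nat) : Int) ≤ M ∧
    ∃ s < cs.length + 1, pvQualP cs mr (k+1) s ∧ s ≤ i ∧ i < pvEnd cs (k+1) s)

-- ---- pvRun facts ----
lemma pvRun_eqAt (cs : List Char) (m j : Nat) :
    ∀ k < pvRun cs m j, (j + k) + m < cs.length ∧ cs.getD (j + k) ' ' = cs.getD (j + k + m) ' ' := by
  fun_induction pvRun cs m j with
  | case1 j h ih =>
    intro k hk
    match k with
    | 0 => simpa using h
    | Nat.succ k' =>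
      have := ih k' (by omega)
      constructor
      · omega
      · have e1 : j + (k'+1) = (j+1) + k' := by omega
        have e2 : j + (k'+1) + m = (j+1) + k' + m := by omega
        rw [e1]; exact this.2
  | case2 j h => intro k hk; omega

lemma pvRun_not_eqAt (cs : List Char) (m j : Nat) :
    ¬ ((j + pvRun cs m j) + m < cs.length ∧
       cs.getD (j + pvRun cs m j) ' ' = cs.getD (j + pvRun cs m j + m) ' ') := by
  fun_induction pvRun cs m j with
  | case1 j h ih =>
    have e1 : j + (pvRun cs m (j+1) + 1) = (j+1) + pvRun cs m (j+1) := by omega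
    rw [e1]; exact ih
  | case2 j h => simpa using h

lemma pvRun_max (cs : List Char) (m j k : Nat)
    (h : ∀ t < k, (j + t) + m < cs.length ∧ cs.getD (j + t) ' ' = cs.getD (j + t + m) ' ') :
    k ≤ pvRun cs m j := by
  by_contra hlt
  exact pvRun_not_eqAt cs m j (h (pvRun cs m j) (by omega))

lemma pvRun_le (cs : List Char) (m j : Nat) (h : j + m ≤ cs.length) :
    j + pvRun cs m j + m ≤ cs.length := by
  rcases Nat.eq_zero_or_pos (pvRun cs m j) with h0 | hp
  · omega
  · have := (pvRun_eqAt cs m j (pvRun cs m j - 1) (by omega)).1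
    omega

lemma pvEnd_le (cs : List Char) (m s : Nat) (_hm : 1 ≤ m) (h : s + m ≤ cs.length) :
    pvEnd cs m s ≤ cs.length := by
  have h1 := pvRun_le cs m s h
  have h2 : pvRun cs m s / m * m ≤ pvRun cs m s := Nat.div_mul_le_self _ _
  simp only [pvEnd, pvCnt, Nat.add_mul, Nat.one_mul]
  omega

lemma pvEnd_gt (cs : List Char) (m s : Nat) (hm : 1 ≤ m) : s < pvEnd cs m s := by
  have h1 : m ≤ (1 + pvRun cs m s / m) * m := Nat.le_mul_of_pos_left m (Nat.lt_of_lt_of_le Nat.zero_lt_one (Nat.le_add_right 1 _))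
  simp only [pvEnd, pvCnt]
  exact Nat.lt_of_lt_of_le (by omega : s < s + m) (Nat.add_le_add_left h1 s)

-- ---- pvNextN facts ----
lemma pvNextN_ge (cs : List Char) (j : Nat) (hj : j ≤ cs.length) : j ≤ pvNextN cs j := by
  fun_induction pvNextN cs j with
  | case1 j h hN => omega
  | case2 j h hN ih => have := ih (by omega); omega
  | case3 j h => omega

lemma pvNextN_le (cs : List Char) (j : Nat) : pvNextN cs j ≤ cs.length := by
  fun_induction pvNextN cs j with
  | case1 j h hN => omega
  | case2 j h hN ih => exact ih
  | case3 j h => omega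

lemma pvNextN_no_N (cs : List Char) (j k : Nat) (h1 : j ≤ k) (h2 : k < pvNextN cs j) :
    cs.getD k ' ' ≠ 'N' := by
  fun_induction pvNextN cs j with
  | case1 j h hN => omega
  | case2 j h hN ih =>
    rcases Nat.eq_or_lt_of_le h1 with he | hlt
    · subst he; exact hN
    · exact ih (by omega) h2
  | case3 j h => have := pvNextN_le cs k; omega

lemma pvNextN_is_N (cs : List Char) (j : Nat) (h : pvNextN cs j < cs.length) :
    cs.getD (pvNextN cs j) ' ' = 'N' := by
  fun_induction pvNextN cs j with
  | case1 j h hN => exact hN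
  | case2 j h hN ih => exact ih h
  | case3 j hj => omega

lemma pvNextN_lt_iff (cs : List Char) (s m : Nat) (h : s + m ≤ cs.length) :
    pvNextN cs s < s + m ↔ ∃ k < m, cs.getD (s + k) ' ' = 'N' := by
  constructor
  · intro hlt
    have hge := pvNextN_ge cs s (by omega)
    refine ⟨pvNextN cs s - s, by omega, ?_⟩
    have : s + (pvNextN cs s - s) = pvNextN cs s := by omega
    rw [this]
    exact pvNextN_is_N cs s (by omega)
  · rintro ⟨k, hk, hN⟩
    by_contra hge
    exact pvNextN_no_N cs s (s + k) (by omega) (by omega) hN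

-- ---- block/slice facts ----
lemma pvBlocks_eq_iff (cs : List Char) (x y m : Nat) (hx : x + m ≤ cs.length)
    (hy : y + m ≤ cs.length) :
    (cs.drop x).take m = (cs.drop y).take m ↔
      ∀ t < m, cs.getD (x + t) ' ' = cs.getD (y + t) ' ' := by
  constructor
  · intro he t ht
    have hxl : t < ((cs.drop x).take m).length := by simp; omega
    have hyl : t < ((cs.drop y).take m).length := by simp; omega
    have := List.getElem_of_eq he hxl
    simp only [List.getElem_take, List.getElem_drop] at this
    rw [List.getD_eq_getElem _ _ (by omega), List.getD_eq_getElem _ _ (by omega)]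
    convert this using 2
  · intro h
    apply List.ext_getElem (by simp; omega)
    intro t h1 h2
    simp only [List.getElem_take, List.getElem_drop]
    have := h t (by simp at h1; omega)
    rw [List.getD_eq_getElem _ _ (by simp at h1; omega),
        List.getD_eq_getElem _ _ (by simp at h1; omega)] at this
    convert this using 2

lemma pvChain_blocks (cs : List Char) (s m : Nat) (k : Nat)
    (heq : ∀ j < k * m, (s + j) + m < cs.length ∧ cs.getD (s + j) ' ' = cs.getD (s + j + m) ' ')
    (hb : s + (k+1) * m ≤ cs.length) :
    (cs.drop (s + k * m)).take m = (cs.drop s).take m := by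
  induction k with
  | zero => simp
  | succ k ih =>
    have e3 : (k+1+1) * m = (k+1) * m + m := by ring
    have e4 : (k+1) * m = k * m + m := by ring
    have hb' : s + (k+1) * m ≤ cs.length := by omega
    have h1 : (cs.drop (s + (k+1) * m)).take m = (cs.drop (s + k * m)).take m := by
      rw [pvBlocks_eq_iff cs _ _ m (by omega) (by omega)]
      intro t ht
      have he := (heq (k * m + t) (by omega)).2
      have e1 : s + (k+1) * m + t = s + (k * m + t) + m := by ring
      have e2 : s + k * m + t = s + (k * m + t) := by ring
      rw [e1, e2]
      exact he.symm
    exact h1.trans (ih (fun j hj => heq j (by omega)) hb')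

lemma pvMotifN_iff (cs : List Char) (s m : Nat) (h : s + m ≤ cs.length) :
    PySem.Chars.isIn ['N'] ((cs.drop s).take m) = true ↔ ∃ k < m, cs.getD (s + k) ' ' = 'N' := by
  rw [PySem.Chars.isIn_iff_infix, List.singleton_infix_iff]
  rw [List.mem_iff_getElem]
  constructor
  · rintro ⟨t, hlt, he⟩
    have ht : t < m := by simp at hlt; omega
    refine ⟨t, ht, ?_⟩
    simp only [List.getElem_take, List.getElem_drop] at he
    rw [List.getD_eq_getElem _ _ (by omega)]
    convert he using 2
  · rintro ⟨k, hk, hN⟩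
    refine ⟨k, by simp; omega, ?_⟩
    simp only [List.getElem_take, List.getElem_drop]
    rw [List.getD_eq_getElem _ _ (by omega)] at hN
    convert hN using 2

-- ---- the while loop computes pvCnt/pvEnd ----
lemma pvWhileA_step (cs : List Char) (m s : Nat) (hm : 1 ≤ m) (_hs : s + m ≤ cs.length) :
    ∀ fuel k, 1 ≤ k → (k-1) * m ≤ pvRun cs m s → pvCnt cs m s ≤ k + fuel →
      pvWhileA cs ((cs.drop s).take m) (m : Int) ((s + k * m : Nat) : Int) (k : Int) fuel
        = (((pvEnd cs m s : Nat) : Int), ((pvCnt cs m s : Nat) : Int)) := by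
  intro fuel
  induction fuel with
  | zero =>
    intro k hk1 hkr hcnt
    have hkle : k ≤ pvCnt cs m s := by
      have : k - 1 ≤ pvRun cs m s / m := (Nat.le_div_iff_mul_le (by omega)).mpr hkr
      simp only [pvCnt]; omega
    have hke : k = pvCnt cs m s := by omega
    simp only [pvWhileA, pvEnd, hke]
  | succ fuel ih =>
    intro k hk1 hkr hcnt
    rw [pvWhileA]
    by_cases hC : k * m ≤ pvRun cs m s
    · -- the loop continues: bounds hold and block k equals the motif
      have hkm1 : k * m - 1 < pvRun cs m s := by
        have : 1 * m ≤ k * m := Nat.mul_le_mul_right _ hk1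
        omega
      have hbnd : s + k * m + m ≤ cs.length := by
        have h1 := (pvRun_eqAt cs m s (k * m - 1) hkm1).1
        have : 1 * m ≤ k * m := Nat.mul_le_mul_right _ hk1
        omega
      have hblk : (cs.drop (s + k * m)).take m = (cs.drop s).take m := by
        apply pvChain_blocks cs s m k (fun j hj => pvRun_eqAt cs m s j (by omega))
        have : (k+1) * m = k * m + m := by ring
        omega
      have hsl : PySem.List.slice cs (some ((s + k * m : Nat) : Int))
          (some (((s + k * m : Nat) : Int) + (m : Int))) = (cs.drop s).take m := by
        rw [PySem.List.slice_natCast_add]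
        exact hblk
      rw [if_pos ⟨by push_cast; omega, hsl⟩]
      have e1 : ((s + k * m : Nat) : Int) + (m : Int) = ((s + (k+1) * m : Nat) : Int) := by
        push_cast; ring
      have e2 : (k : Int) + 1 = ((k + 1 : Nat) : Int) := by push_cast; ring
      rw [e1, e2]
      exact ih (k+1) (by omega) (by simpa using hC) (by omega)
    · -- the loop stops here, and k = pvCnt
      have hke : k = pvCnt cs m s := by
        have h1 : k - 1 ≤ pvRun cs m s / m := (Nat.le_div_iff_mul_le (by omega)).mpr hkr
        have h2 : pvRun cs m s / m < k := (Nat.div_lt_iff_lt_mul (by omega)).mpr (by omega)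
        simp only [pvCnt]; omega
      rw [if_neg]
      · simp only [pvEnd, hke]
      · rintro ⟨hb, hsl⟩
        apply hC
        -- from block k = motif derive the missing character equalities and extend the run
        have hbnd : s + k * m + m ≤ cs.length := by push_cast at hb; omega
        have e5 : (k-1+1) = k := by omega
        have e6 : (k-1) * m + m = k * m := by
          calc (k-1) * m + m = (k-1+1) * m := by ring
            _ = k * m := by rw [e5]
        have hblkm1 : (cs.drop (s + (k-1) * m)).take m = (cs.drop s).take m := by
          apply pvChain_blocks cs s m (k-1) (fun j hj => pvRun_eqAt cs m s j (by omega))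
          have e9 : (k-1+1) * m = k * m := by rw [e5]
          omega
        have hblk : (cs.drop (s + k * m)).take m = (cs.drop s).take m := by
          rw [PySem.List.slice_natCast_add] at hsl
          exact hsl
        have hstep : ∀ t < m, cs.getD (s + k * m + t) ' ' = cs.getD (s + (k-1) * m + t) ' ' := by
          exact (pvBlocks_eq_iff cs (s + k * m) (s + (k-1) * m) m (by omega) (by omega)).mp
            (hblk.trans hblkm1.symm)
        apply pvRun_max
        intro t ht
        by_cases htl : t < (k-1) * m
        · exact pvRun_eqAt cs m s t (by omega)
        · have ht' : t - (k-1) * m < m := by omega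
          have := (hstep (t - (k-1) * m) ht').symm
          constructor
          · omega
          · have e7 : s + (k-1) * m + (t - (k-1) * m) = s + t := by omega
            have e8 : s + k * m + (t - (k-1) * m) = s + t + m := by omega
            rw [e7, e8] at this
            exact this

lemma pvWhileA_spec (cs : List Char) (m s : Nat) (hm : 1 ≤ m) (hs : s + m ≤ cs.length) :
    pvWhileA cs ((cs.drop s).take m) (m : Int) (s : Int) 0 (cs.length + 1)
      = (((pvEnd cs m s : Nat) : Int), ((pvCnt cs m s : Nat) : Int)) := by
  rw [pvWhileA]
  have hsl : PySem.List.slice cs (some (s : Int)) (some ((s : Int) + (m : Int)))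
      = (cs.drop s).take m := PySem.List.slice_natCast_add cs s m
  rw [if_pos ⟨by omega, hsl⟩]
  have e1 : (s : Int) + (m : Int) = ((s + 1 * m : Nat) : Int) := by push_cast; ring
  have e2 : (0 : Int) + 1 = ((1 : Nat) : Int) := by norm_num
  rw [e1, e2]
  apply pvWhileA_step cs m s hm hs (cs.length) 1 (by omega) (by omega)
  have hr := pvRun_le cs m s hs
  have : pvRun cs m s / m ≤ pvRun cs m s := Nat.div_le_self _ _
  simp only [pvCnt]
  omega

-- ---- generic flag-painting fold ----
def pvPaint (fl : List Int) (a b : Nat) : List Int :=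
  (PySem.List.pyRange (a : Int) (b : Int) 1).foldl (fun fl idx => PySem.List.pySetD fl idx 1) fl

lemma pvSet_getD (fl : List Int) (j i : Nat) (hj : j < fl.length) :
    (fl.set j (1:Int)).getD i 0 = if i = j then 1 else fl.getD i 0 := by
  have h := PySem.List.pyGetD_pySetD_natCast fl j i 1 0 hj
  rw [PySem.List.pySetD_natCast, PySem.List.pyGetD_natCast, PySem.List.pyGetD_natCast] at h
  exact h

lemma pvPaintFold_length (L : List Int) (fl : List Int) :
    (L.foldl (fun fl idx => PySem.List.pySetD fl idx 1) fl).length = fl.length := by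
  induction L generalizing fl with
  | nil => rfl
  | cons x t ih => simp only [List.foldl_cons]; rw [ih]; exact PySem.List.length_pySetD ..

lemma pvPaint_getD (fl : List Int) (a b : Nat) (i : Nat) (hb : b ≤ fl.length) :
    (pvPaint fl a b).getD i 0 = if a ≤ i ∧ i < b then 1 else fl.getD i 0 := by
  induction b generalizing fl with
  | zero =>
    unfold pvPaint
    rw [PySem.List.pyRange_one]
    have h0 : (((0:Nat):Int) - (a:Int)).toNat = 0 := by omega
    rw [h0]
    simp only [List.range_zero, List.map_nil, List.foldl_nil]
    rw [if_neg (by omega)]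
  | succ b ih =>
    by_cases hab : a ≤ b
    · unfold pvPaint at ih ⊢
      rw [show ((b+1 : Nat) : Int) = (b:Int)+1 by push_cast; ring,
          PySem.List.pyRange_one_succ_right (by exact_mod_cast hab), List.foldl_append]
      simp only [List.foldl_cons, List.foldl_nil]
      rw [PySem.List.pySetD_natCast]
      rw [pvSet_getD _ b i (by rw [pvPaintFold_length]; omega)]
      rw [ih fl (by omega)]
      split_ifs <;> first | rfl | omega
    · unfold pvPaint
      rw [PySem.List.pyRange_one]
      have h0 : (((b+1:Nat):Int) - (a:Int)).toNat = 0 := by omega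
      rw [h0]
      simp only [List.range_zero, List.map_nil, List.foldl_nil]
      rw [if_neg (by omega)]

lemma pvFoldFlag {β : Type} (L : List β) (N₀ : Nat) (E : β → Nat → Prop)
    [inst : ∀ x i, Decidable (E x i)] (step : List Int → β → List Int)
    (hlen : ∀ fl x, x ∈ L → fl.length = N₀ → (step fl x).length = N₀)
    (hstep : ∀ fl x i, x ∈ L → fl.length = N₀ →
      (step fl x).getD i 0 = if E x i then 1 else fl.getD i 0) :
    ∀ fl, fl.length = N₀ → (L.foldl step fl).length = N₀ ∧
      ∀ i, (L.foldl step fl).getD i 0 = if ∃ x ∈ L, E x i then 1 else fl.getD i 0 := by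
  induction L with
  | nil => intro fl hfl; simpa using hfl
  | cons x t ih =>
    intro fl hfl
    simp only [List.foldl_cons]
    obtain ⟨hl1, h1⟩ := ih (fun fl y hy => hlen fl y (List.mem_cons_of_mem x hy))
      (fun fl y i hy => hstep fl y i (List.mem_cons_of_mem x hy))
      (step fl x) (hlen fl x (List.mem_cons_self ..) hfl)
    refine ⟨hl1, fun i => ?_⟩
    rw [h1 i, hstep fl x i (List.mem_cons_self ..) hfl]
    have hiff : (∃ y ∈ x :: t, E y i) ↔ (E x i ∨ ∃ y ∈ t, E y i) := by simp
    simp only [hiff]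
    by_cases hE : ∃ y ∈ t, E y i <;> by_cases hEx : E x i <;> simp [hE, hEx]

-- ---- generic additive (difference-array) fold ----
lemma pvFoldAdd {β : Type} (L : List β) (N₀ : Nat) (w : β → Int) (step : List Int → β → List Int)
    (hlen : ∀ d x, x ∈ L → d.length = N₀ → (step d x).length = N₀)
    (hstep : ∀ d x, x ∈ L → d.length = N₀ →
      ((step d x).take t).sum = (d.take t).sum + w x) :
    ∀ d, d.length = N₀ → (L.foldl step d).length = N₀ ∧
      ((L.foldl step d).take t).sum = (d.take t).sum + (L.map w).sum := by
  induction L with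
  | nil => intro d hd; simpa using hd
  | cons x l ih =>
    intro d hd
    simp only [List.foldl_cons]
    obtain ⟨hl1, h1⟩ := ih (fun d y hy => hlen d y (List.mem_cons_of_mem x hy))
      (fun d y hy => hstep d y (List.mem_cons_of_mem x hy))
      (step d x) (hlen d x (List.mem_cons_self ..) hd)
    refine ⟨hl1, ?_⟩
    rw [h1, hstep d x (List.mem_cons_self ..) hd]
    simp only [List.map_cons, List.sum_cons]
    ring

lemma pvTake_sum_succ (d : List Int) (i : Nat) :
    (d.take (i+1)).sum = (d.take i).sum + d.getD i 0 := by
  induction d generalizing i with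
  | nil => simp [List.getD]
  | cons x d ih =>
    cases i with
    | zero => simp [List.getD]
    | succ i' => simp only [List.take_succ_cons, List.sum_cons, ih i', List.getD]; simp; ring

lemma pvBump_length (d : List Int) (i : Nat) (v : Int) : (pvBump d i v).length = d.length := by
  simp [pvBump]

lemma pvBump_take_sum (d : List Int) (i : Nat) (v : Int) (t : Nat) (h : i < d.length) :
    ((pvBump d i v).take t).sum = (d.take t).sum + if i < t then v else 0 := by
  induction d generalizing i t with
  | nil => simp at h
  | cons x d ih =>
    cases i with
    | zero =>
      cases t with
      | zero => simp [pvBump]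
      | succ t' => simp [pvBump, List.getD]; ring
    | succ i' =>
      cases t with
      | zero => simp [pvBump]
      | succ t' =>
        have h' : i' < d.length := by simpa using h
        have e : pvBump (x::d) (i'+1) v = x :: pvBump d i' v := by
          simp [pvBump, List.getD]
        rw [e]
        simp only [List.take_succ_cons, List.sum_cons]
        rw [ih i' t' h']
        split_ifs <;> omega

lemma pvSum_pos_iff {β : Type} (L : List β) (f : β → Int) (h : ∀ x ∈ L, 0 ≤ f x) :
    0 < (L.map f).sum ↔ ∃ x ∈ L, 0 < f x := by
  induction L with
  | nil => simp
  | cons x l ih =>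
    simp only [List.map_cons, List.sum_cons, List.mem_cons]
    have hx := h x (List.mem_cons_self ..)
    have hrest : 0 ≤ (l.map f).sum :=
      List.sum_nonneg (by rintro y hy; obtain ⟨z, hz, rfl⟩ := List.mem_map.mp hy
                          exact h z (List.mem_cons_of_mem x hz))
    have ihl := ih (fun y hy => h y (List.mem_cons_of_mem x hy))
    constructor
    · intro hpos
      by_cases hfx : 0 < f x
      · exact ⟨x, Or.inl rfl, hfx⟩
      · have : 0 < (l.map f).sum := by omega
        obtain ⟨y, hy, hfy⟩ := ihl.mp this
        exact ⟨y, Or.inr hy, hfy⟩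
    · rintro ⟨y, (rfl | hy), hfy⟩
      · omega
      · have := ihl.mpr ⟨y, hy, hfy⟩; omega

-- ---- characterization of A ----
-- the body of A's inner loop, as a named function (definitionally equal to the port's lambda)
def pvABody (cs : List Char) (mr : Int) (ml : Int) : List Int → Int → List Int :=
  fun flags start =>
    if PySem.Chars.isIn ['N'] (PySem.List.slice cs (some start) (some (start + ml))) ∨
       ((PySem.List.slice cs (some start) (some (start + ml))).length : Int) < ml then flags
    else
      if true = true ∧ mr ≤ (pvWhileA cs (PySem.List.slice cs (some start) (some (start + ml)))
            ml start 0 (cs.length+1)).2 then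
        (PySem.List.pyRange start (min (pvWhileA cs (PySem.List.slice cs (some start)
            (some (start + ml))) ml start 0 (cs.length+1)).1 (cs.length : Int)) 1).foldl
          (fun fl idx => PySem.List.pySetD fl idx 1) flags
      else flags

lemma pvABody_length (cs : List Char) (mr ml : Int) (fl : List Int) (st : Int) :
    (pvABody cs mr ml fl st).length = fl.length := by
  unfold pvABody
  split_ifs <;> first | rfl | exact pvPaintFold_length _ fl

-- one start of A's inner loop
lemma pvA_step (cs : List Char) (mr : Int) (m : Nat) (hm : 1 ≤ m) (st : Int) (hst : 0 ≤ st)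
    (fl : List Int) (hfl : fl.length = cs.length) (i : Nat) :
    (pvABody cs mr (m:Int) fl st).getD i 0
      = if pvQualP cs mr m st.toNat ∧ st.toNat ≤ i ∧ i < pvEnd cs m st.toNat then 1
        else fl.getD i 0 := by
  unfold pvABody
  obtain ⟨s, rfl⟩ : ∃ s : Nat, st = (s : Nat) := ⟨st.toNat, (Int.toNat_of_nonneg hst).symm⟩
  rw [Int.toNat_natCast]
  have hsl : PySem.List.slice cs (some (s:Int)) (some ((s:Int) + (m:Int))) = (cs.drop s).take m :=
    PySem.List.slice_natCast_add cs s m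
  rw [hsl]
  by_cases hrange : s + m ≤ cs.length
  · have hlen : ((cs.drop s).take m).length = m := by simp; omega
    by_cases hN : ∃ k < m, cs.getD (s + k) ' ' = 'N'
    · rw [if_pos (Or.inl ((pvMotifN_iff cs s m hrange).mpr hN))]
      rw [if_neg]
      rintro ⟨⟨_, hnoN, _⟩, _⟩
      obtain ⟨k, hk, hNk⟩ := hN
      exact hnoN k hk hNk
    · rw [if_neg (by
        rintro (hin | hlt)
        · exact hN ((pvMotifN_iff cs s m hrange).mp hin)
        · rw [hlen] at hlt; omega)]
      rw [pvWhileA_spec cs m s hm hrange]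
      by_cases hrep : mr ≤ (pvCnt cs m s : Int)
      · rw [if_pos ⟨rfl, hrep⟩]
        have hmin : min ((pvEnd cs m s : Nat) : Int) (cs.length : Int)
            = ((pvEnd cs m s : Nat) : Int) := by
          have := pvEnd_le cs m s hm hrange
          omega
        rw [hmin]
        have hq : pvQualP cs mr m s :=
          ⟨hrange, fun k hk hNk => hN ⟨k, hk, hNk⟩, hrep⟩
        rw [show ((PySem.List.pyRange (s:Int) ((pvEnd cs m s : Nat) : Int) 1).foldl
            (fun fl idx => PySem.List.pySetD fl idx 1) fl) = pvPaint fl s (pvEnd cs m s) from rfl]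
        rw [pvPaint_getD fl s (pvEnd cs m s) i (by rw [hfl]; exact pvEnd_le cs m s hm hrange)]
        by_cases hcov : s ≤ i ∧ i < pvEnd cs m s
        · rw [if_pos hcov, if_pos ⟨hq, hcov⟩]
        · rw [if_neg hcov, if_neg (by rintro ⟨_, h⟩; exact hcov h)]
      · rw [if_neg (by rintro ⟨_, h⟩; exact hrep h)]
        rw [if_neg (by rintro ⟨⟨_, _, hq3⟩, _⟩; exact hrep hq3)]
  · rw [if_pos (Or.inr (by
      have : ((cs.drop s).take m).length = min m (cs.length - s) := by simp
      omega))]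
    rw [if_neg (by rintro ⟨⟨hq1, _, _⟩, _⟩; exact hrange hq1)]

lemma pvGetD_replicate (n i : Nat) : (List.replicate n (0:Int)).getD i 0 = 0 := by
  rcases Nat.lt_or_ge i n with h | h
  · rw [List.getD_eq_getElem _ _ (by simpa using h)]; simp
  · rw [List.getD_eq_default _ _ (by simpa using h)]

-- A's inner loop over all starts, for one motif length
lemma pvA_inner (cs : List Char) (mr ml : Int) (hml : 1 ≤ ml) (fl : List Int)
    (hfl : fl.length = cs.length) :
    (((PySem.List.pyRange 0 (max ((cs.length : Int) - ml * mr + 1) 0) 1).foldl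
        (pvABody cs mr ml) fl).length = cs.length) ∧
    ∀ i, ((PySem.List.pyRange 0 (max ((cs.length : Int) - ml * mr + 1) 0) 1).foldl
        (pvABody cs mr ml) fl).getD i 0
      = if ∃ s < cs.length + 1, pvQualP cs mr ml.toNat s ∧ s ≤ i ∧ i < pvEnd cs ml.toNat s
        then 1 else fl.getD i 0 := by
  obtain ⟨m, rfl⟩ : ∃ m : Nat, ml = (m : Int) := ⟨ml.toNat, (Int.toNat_of_nonneg (by omega)).symm⟩
  have hm : 1 ≤ m := by omega
  obtain ⟨hL, hG⟩ := pvFoldFlag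
    (L := PySem.List.pyRange 0 (max ((cs.length : Int) - (m:Int) * mr + 1) 0) 1)
    (N₀ := cs.length)
    (E := fun st i => pvQualP cs mr m st.toNat ∧ st.toNat ≤ i ∧ i < pvEnd cs m st.toNat)
    (step := pvABody cs mr (m:Int))
    (fun fl st _ hfl => by rw [pvABody_length]; exact hfl)
    (fun fl st i hmem hfl =>
      pvA_step cs mr m hm st (PySem.List.mem_pyRange_one.mp hmem).1 fl hfl i)
    fl hfl
  rw [Int.toNat_natCast]
  refine ⟨hL, fun i => ?_⟩
  rw [hG i]
  congr 1
  rw [eq_iff_iff]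
  constructor
  · rintro ⟨st, hmem, hq, hle, hlt⟩
    exact ⟨st.toNat, by have := hq.1; omega, hq, hle, hlt⟩
  · rintro ⟨s, _, hq, hle, hlt⟩
    refine ⟨(s : Int), ?_, by rw [Int.toNat_natCast]; exact hq,
      by rw [Int.toNat_natCast]; exact hle, by rw [Int.toNat_natCast]; exact hlt⟩
    rw [PySem.List.mem_pyRange_one]
    refine ⟨by omega, ?_⟩
    have hend := pvEnd_le cs m s hm hq.1
    have hcnt := hq.2.2
    have h1 : (m:Int) * mr ≤ (m:Int) * (pvCnt cs m s : Int) :=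
      mul_le_mul_of_nonneg_left hcnt (by positivity)
    have h2 : (s:Int) + (pvCnt cs m s : Int) * (m:Int) ≤ (cs.length : Int) := by
      simp only [pvEnd] at hend
      exact_mod_cast hend
    have h3 : (m:Int) * (pvCnt cs m s : Int) = (pvCnt cs m s : Int) * (m:Int) := mul_comm _ _
    omega

lemma pvA_char (seq : String) (M mr : Int) :
    (detect_tandem_repeat_flags seq M mr).length = seq.toList.length ∧
    ∀ i, (detect_tandem_repeat_flags seq M mr).getD i 0
          = if pvCovP seq.toList mr M i then 1 else 0 := by
  have heq : detect_tandem_repeat_flags seq M mr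
      = (PySem.List.pyRange 1 (M+1) 1).foldl (fun flags ml =>
          (PySem.List.pyRange 0 (max ((seq.toList.length : Int) - ml * mr + 1) 0) 1).foldl
            (pvABody seq.toList mr ml) flags) (List.replicate seq.toList.length 0) := rfl
  obtain ⟨hL, hG⟩ := pvFoldFlag
    (L := PySem.List.pyRange 1 (M+1) 1) (N₀ := seq.toList.length)
    (E := fun ml i => ∃ s < seq.toList.length + 1,
      pvQualP seq.toList mr ml.toNat s ∧ s ≤ i ∧ i < pvEnd seq.toList ml.toNat s)
    (step := fun flags ml =>
      (PySem.List.pyRange 0 (max ((seq.toList.length : Int) - ml * mr + 1) 0) 1).foldl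
        (pvABody seq.toList mr ml) flags)
    (fun fl ml hmem hfl =>
      (pvA_inner seq.toList mr ml (PySem.List.mem_pyRange_one.mp hmem).1 fl hfl).1)
    (fun fl ml i hmem hfl =>
      (pvA_inner seq.toList mr ml (PySem.List.mem_pyRange_one.mp hmem).1 fl hfl).2 i)
    (List.replicate seq.toList.length 0) (by simp)
  rw [heq]
  refine ⟨hL, fun i => ?_⟩
  rw [hG i, pvGetD_replicate]
  congr 1
  rw [eq_iff_iff]
  constructor
  · rintro ⟨ml, hmem, s, hs, hq, hle, hlt⟩
    rw [PySem.List.mem_pyRange_one] at hmem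
    have hm1 : 1 ≤ ml.toNat := by omega
    refine ⟨ml.toNat - 1, ?_, ?_, s, hs, ?_, hle, ?_⟩
    · have := hq.1; omega
    · have : ((ml.toNat : Nat) : Int) = ml := Int.toNat_of_nonneg (by omega)
      rw [show ml.toNat - 1 + 1 = ml.toNat by omega, this]; omega
    · rw [show ml.toNat - 1 + 1 = ml.toNat by omega]; exact hq
    · rw [show ml.toNat - 1 + 1 = ml.toNat by omega]; exact hlt
  · rintro ⟨k, hk, hle, s, hs, hq, hsle, hslt⟩
    refine ⟨((k+1 : Nat) : Int), ?_, s, hs, ?_, hsle, ?_⟩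
    · rw [PySem.List.mem_pyRange_one]; omega
    · rw [Int.toNat_natCast]; exact hq
    · rw [Int.toNat_natCast]; exact hslt

-- ---- characterization of B ----
-- the body of B's inner loop, as a named function (definitionally equal to the port's lambda)
def pvBBody (cs : List Char) (mr : Int) (m : Nat) : List Int → Nat → List Int :=
  fun diff s =>
    if pvNextN cs s < s + m then diff
    else
      if mr ≤ ((1 + pvRun cs m s / m : Nat) : Int) then
        pvBump (pvBump diff s 1) (s + (1 + pvRun cs m s / m) * m) (-1)
      else diff

def pvBDiff (cs : List Char) (mr M : Int) : List Int :=
  (PySem.List.pyRange 1 (min M (PySem.Int.floordiv (cs.length : Int) (max mr 1)) + 1) 1).foldl (fun diff mi =>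
    (List.range (cs.length - mi.toNat + 1)).foldl (pvBBody cs mr mi.toNat) diff)
    (List.replicate (cs.length + 1) 0)

lemma pvB_eq (seq : String) (M mr : Int) :
    detect_tandem_repeat_flags_alt seq M mr =
      ((List.range seq.toList.length).foldl (fun (acc : List Int × Int) i =>
        (acc.1 ++ [if 0 < acc.2 + (pvBDiff seq.toList mr M).getD i 0 then (1:Int) else 0],
         acc.2 + (pvBDiff seq.toList mr M).getD i 0)) ([], 0)).1 := rfl

lemma pvBuild (diff : List Int) (K : Nat) :
    ((List.range K).foldl (fun (acc : List Int × Int) i =>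
      (acc.1 ++ [if 0 < acc.2 + diff.getD i 0 then (1:Int) else 0], acc.2 + diff.getD i 0))
      ([], 0))
    = ((List.range K).map (fun i => if 0 < (diff.take (i+1)).sum then (1:Int) else 0),
       (diff.take K).sum) := by
  induction K with
  | zero => simp
  | succ K ih =>
    rw [List.range_succ, List.foldl_append, ih]
    simp only [List.foldl_cons, List.foldl_nil, List.map_append, List.map_cons, List.map_nil]
    rw [← pvTake_sum_succ]

lemma pvBBody_length (cs : List Char) (mr : Int) (m : Nat) (d : List Int) (s : Nat) :
    (pvBBody cs mr m d s).length = d.length := by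
  unfold pvBBody
  split_ifs <;> simp [pvBump]

-- one start of B's inner loop: effect on the prefix sum of the difference array
lemma pvB_step (cs : List Char) (mr : Int) (m : Nat) (hm : 1 ≤ m) (_hmn : m ≤ cs.length)
    (s : Nat) (hs : s + m ≤ cs.length) (d : List Int) (hd : d.length = cs.length + 1) (i : Nat) :
    ((pvBBody cs mr m d s).take (i+1)).sum = (d.take (i+1)).sum +
      (if pvQualP cs mr m s ∧ s ≤ i ∧ i < pvEnd cs m s then (1:Int) else 0) := by
  unfold pvBBody
  by_cases hNN : pvNextN cs s < s + m
  · rw [if_pos hNN, if_neg]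
    · ring
    · rintro ⟨⟨_, hnoN, _⟩, _⟩
      obtain ⟨k, hk, hNk⟩ := (pvNextN_lt_iff cs s m hs).mp hNN
      exact hnoN k hk hNk
  · rw [if_neg hNN]
    by_cases hrep : mr ≤ ((1 + pvRun cs m s / m : Nat) : Int)
    · rw [if_pos hrep]
      have hq : pvQualP cs mr m s :=
        ⟨hs, fun k hk hNk => hNN ((pvNextN_lt_iff cs s m hs).mpr ⟨k, hk, hNk⟩), hrep⟩
      have hend_le : pvEnd cs m s ≤ cs.length := pvEnd_le cs m s hm hs
      have hend_gt : s < pvEnd cs m s := pvEnd_gt cs m s hm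
      have hb1 : (pvBump d s 1).length = d.length := pvBump_length ..
      have he : s + (1 + pvRun cs m s / m) * m = pvEnd cs m s := rfl
      rw [he, pvBump_take_sum _ _ _ _ (by omega), pvBump_take_sum _ _ _ _ (by omega)]
      have hcond : (if pvQualP cs mr m s ∧ s ≤ i ∧ i < pvEnd cs m s then (1:Int) else 0)
          = (if s ≤ i ∧ i < pvEnd cs m s then (1:Int) else 0) := by
        by_cases hX : s ≤ i ∧ i < pvEnd cs m s
        · rw [if_pos hX, if_pos ⟨hq, hX⟩]
        · rw [if_neg hX, if_neg (by rintro ⟨_, h⟩; exact hX h)]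
      rw [hcond]
      split_ifs <;> omega
    · rw [if_neg hrep, if_neg (by rintro ⟨⟨_, _, hq3⟩, _⟩; exact hrep hq3)]
      ring

lemma pvBDiff_char (cs : List Char) (mr M : Int) (i : Nat) :
    ((pvBDiff cs mr M).take (i+1)).sum =
      ((PySem.List.pyRange 1 (min M (PySem.Int.floordiv (cs.length : Int) (max mr 1)) + 1) 1).map (fun mi =>
        ((List.range (cs.length - mi.toNat + 1)).map (fun s =>
          if pvQualP cs mr mi.toNat s ∧ s ≤ i ∧ i < pvEnd cs mi.toNat s then (1:Int) else 0)).sum)).sum := by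
  unfold pvBDiff
  obtain ⟨hL, hS⟩ := pvFoldAdd (t := i+1)
    (L := PySem.List.pyRange 1 (min M (PySem.Int.floordiv (cs.length : Int) (max mr 1)) + 1) 1)
    (N₀ := cs.length + 1)
    (w := fun mi => ((List.range (cs.length - mi.toNat + 1)).map (fun s =>
      if pvQualP cs mr mi.toNat s ∧ s ≤ i ∧ i < pvEnd cs mi.toNat s then (1:Int) else 0)).sum)
    (step := fun diff mi =>
      (List.range (cs.length - mi.toNat + 1)).foldl (pvBBody cs mr mi.toNat) diff)
    (fun d mi hmem hd => by
      have hmi := PySem.List.mem_pyRange_one.mp hmem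
      have hm : 1 ≤ mi.toNat := by omega
      have hfd : PySem.Int.floordiv (cs.length : Int) (max mr 1)
          = (cs.length : Int) / (max mr 1) := PySem.Int.floordiv_eq_ediv_of_pos (by omega)
      have hds : (cs.length : Int) / (max mr 1) ≤ (cs.length : Int) :=
        Int.ediv_le_self _ (by positivity)
      have hmn : mi.toNat ≤ cs.length := by omega
      exact (pvFoldAdd (t := i+1) (L := List.range (cs.length - mi.toNat + 1))
        (N₀ := cs.length + 1)
        (w := fun s => if pvQualP cs mr mi.toNat s ∧ s ≤ i ∧ i < pvEnd cs mi.toNat s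
          then (1:Int) else 0)
        (step := pvBBody cs mr mi.toNat)
        (fun d s hsm hd => by rw [pvBBody_length]; exact hd)
        (fun d s hsm hd =>
          pvB_step cs mr mi.toNat hm hmn s (by have := List.mem_range.mp hsm; omega) d hd i)
        d hd).1)
    (fun d mi hmem hd => by
      have hmi := PySem.List.mem_pyRange_one.mp hmem
      have hm : 1 ≤ mi.toNat := by omega
      have hfd : PySem.Int.floordiv (cs.length : Int) (max mr 1)
          = (cs.length : Int) / (max mr 1) := PySem.Int.floordiv_eq_ediv_of_pos (by omega)
      have hds : (cs.length : Int) / (max mr 1) ≤ (cs.length : Int) :=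
        Int.ediv_le_self _ (by positivity)
      have hmn : mi.toNat ≤ cs.length := by omega
      exact (pvFoldAdd (t := i+1) (L := List.range (cs.length - mi.toNat + 1))
        (N₀ := cs.length + 1)
        (w := fun s => if pvQualP cs mr mi.toNat s ∧ s ≤ i ∧ i < pvEnd cs mi.toNat s
          then (1:Int) else 0)
        (step := pvBBody cs mr mi.toNat)
        (fun d s hsm hd => by rw [pvBBody_length]; exact hd)
        (fun d s hsm hd =>
          pvB_step cs mr mi.toNat hm hmn s (by have := List.mem_range.mp hsm; omega) d hd i)
        d hd).2)
    (List.replicate (cs.length + 1) 0) (by simp)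
  rw [hS]
  simp

lemma pvB_char (seq : String) (M mr : Int) :
    (detect_tandem_repeat_flags_alt seq M mr).length = seq.toList.length ∧
    ∀ i, (detect_tandem_repeat_flags_alt seq M mr).getD i 0
          = if pvCovP seq.toList mr M i then 1 else 0 := by
  rw [pvB_eq, pvBuild]
  refine ⟨by simp, fun i => ?_⟩
  by_cases hin : i < seq.toList.length
  · rw [List.getD_eq_getElem _ _ (by simpa using hin)]
    simp only [List.getElem_map, List.getElem_range]
    rw [pvBDiff_char]
    congr 1
    rw [eq_iff_iff]
    rw [pvSum_pos_iff _ _ (fun mi _ => List.sum_nonneg (by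
      intro x hx
      obtain ⟨s2, _, rfl⟩ := List.mem_map.mp hx
      split_ifs <;> norm_num))]
    constructor
    · rintro ⟨mi, hmem, hpos⟩
      have hmi := PySem.List.mem_pyRange_one.mp hmem
      obtain ⟨s2, hs2, hq2⟩ := (pvSum_pos_iff _ _ (by
        intro x _; split_ifs <;> norm_num)).mp hpos
      have hcond : pvQualP seq.toList mr mi.toNat s2 ∧ s2 ≤ i ∧ i < pvEnd seq.toList mi.toNat s2 := by
        by_contra hc
        rw [if_neg hc] at hq2
        omega
      have hm1 : 1 ≤ mi.toNat := by omega
      refine ⟨mi.toNat - 1, ?_, ?_, s2, ?_, ?_, hcond.2.1, ?_⟩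
      · have := hcond.1.1; omega
      · have hc : ((mi.toNat : Nat) : Int) = mi := Int.toNat_of_nonneg (by omega)
        rw [show mi.toNat - 1 + 1 = mi.toNat by omega, hc]; omega
      · omega
      · rw [show mi.toNat - 1 + 1 = mi.toNat by omega]; exact hcond.1
      · rw [show mi.toNat - 1 + 1 = mi.toNat by omega]; exact hcond.2.2
    · rintro ⟨k, hk, hle, s2, hs2, hq, hsle, hslt⟩
      refine ⟨((k+1 : Nat) : Int), ?_, ?_⟩
      · rw [PySem.List.mem_pyRange_one]
        have hcnt1 : (1 : Int) ≤ (pvCnt seq.toList (k+1) s2 : Int) := by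
          have : 1 ≤ pvCnt seq.toList (k+1) s2 := Nat.le_add_right 1 _
          exact_mod_cast this
        have hmx : max mr 1 ≤ (pvCnt seq.toList (k+1) s2 : Int) := by
          have := hq.2.2; omega
        have hend := pvEnd_le seq.toList (k+1) s2 (by omega) hq.1
        have hcast : ((pvCnt seq.toList (k+1) s2 * (k+1) : Nat) : Int) ≤ (seq.toList.length : Int) := by
          simp only [pvEnd] at hend
          exact_mod_cast (by omega : pvCnt seq.toList (k+1) s2 * (k+1) ≤ seq.toList.length)
        have hmul : ((k+1 : Nat) : Int) * max mr 1 ≤ (seq.toList.length : Int) := by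
          have h3 : ((k+1 : Nat) : Int) * max mr 1
              ≤ ((k+1 : Nat) : Int) * (pvCnt seq.toList (k+1) s2 : Int) :=
            mul_le_mul_of_nonneg_left hmx (by positivity)
          have h4 : ((k+1 : Nat) : Int) * (pvCnt seq.toList (k+1) s2 : Int)
              = ((pvCnt seq.toList (k+1) s2 * (k+1) : Nat) : Int) := by push_cast; ring
          omega
        have hediv : ((k+1 : Nat) : Int) ≤ (seq.toList.length : Int) / (max mr 1) :=
          (Int.le_ediv_iff_mul_le (by omega)).mpr hmul
        have hfd : PySem.Int.floordiv (seq.toList.length : Int) (max mr 1)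
            = (seq.toList.length : Int) / (max mr 1) :=
          PySem.Int.floordiv_eq_ediv_of_pos (by omega)
        have h1 : ((k+1 : Nat) : Int) ≤ M := hle
        omega
      · apply (pvSum_pos_iff _ _ (by intro x _; split_ifs <;> norm_num)).mpr
        refine ⟨s2, ?_, ?_⟩
        · rw [List.mem_range, Int.toNat_natCast]
          have := hq.1; omega
        · rw [Int.toNat_natCast, if_pos ⟨hq, hsle, hslt⟩]; norm_num
  · rw [List.getD_eq_default _ _ (by simpa using hin)]
    rw [if_neg]
    rintro ⟨k, hk, hle, s2, hs2, hq, hsle, hslt⟩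
    have := pvEnd_le seq.toList (k+1) s2 (by omega) hq.1
    omega

-- ===== VERDICT (by name: the statement is the Claim_ definition above) =====
theorem detect_tandem_repeat_flags_spec : Claim_equal_detect_tandem_repeat_flags := by
  intro seq M mr _hdom
  unfold Spec_detect_tandem_repeat_flags
  obtain ⟨hAl, hA⟩ := pvA_char seq M mr
  obtain ⟨hBl, hB⟩ := pvB_char seq M mr
  apply List.ext_getElem (by rw [hAl, hBl])
  intro i h1 h2
  have := (hA i).trans ((hB i).symm)
  rwa [List.getD_eq_getElem _ _ h1, List.getD_eq_getElem _ _ h2] at this
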